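-- pv_equiv track=rewrite | github.com/walegahaha/image_cropper | result/crop.py | MaxSubarrayFL
-- ===== SOURCE A (Python) =====
-- def MaxSubarrayFL(array, w, T):
--     for i in range(1, len(array)): array[i] += array[i-1]
--     j1 = -1
--     Smax = -1
--     wr = -1
--     w1, w2 = min(w), max(w)
--     if T > 0 and w1 > 0:
--         for st in range(1, len(array)-w2+1):
--             for offset in range(w2-w1+1):
--                 S0 = array[st+offset+w1-1] - (array[st-1] if st>=1 else 0)
--                 if S0 >= T and S0 > Smax:
--                     j1 = st
--                     wr = w1 + offset
--                     Smax = S0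
--     return j1, wr, Smax
-- ===== SOURCE B (Python) =====
-- from collections import deque
--
-- def MaxSubarrayFL(array, w, T):
--     # Return-value equivalent to A; does not mutate `array` (A turns it into prefix sums in place).
--     w1, w2 = min(w), max(w)
--     n = len(array)
--     j1, wr, Smax = -1, -1, -1
--     if T <= 0 or w1 <= 0 or n - w2 < 1:
--         return j1, wr, Smax
--     P = []
--     s = 0
--     for x in array:
--         s += x
--         P.append(s)
--     dq = deque()          # indices e, increasing; P[e] non-increasing; front = earliest max
--     nxt = w1              # next prefix index to feed into the deque
--     for st in range(1, n - w2 + 1):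
--         lo = st + w1 - 1
--         hi = st + w2 - 1
--         while nxt <= hi:
--             while dq and P[dq[-1]] < P[nxt]:
--                 dq.pop()
--             dq.append(nxt)
--             nxt += 1
--         while dq and dq[0] < lo:
--             dq.popleft()
--         e = dq[0]
--         S = P[e] - P[st - 1]
--         if S >= T and S > Smax:
--             j1, wr, Smax = st, e - st + 1, S
--     return j1, wr, Smax
-- ===== Notes on version B (the rewrite author's own statement) =====
-- stated objective: alternative
-- what changed: A scans every window length for every start over an in-place prefix-sum array; B builds prefix sums once and maintains a monotonic deque giving each start's sliding-window maximum prefix value in amortized O(1), removing the inner scan. Intended as faster (the inner scan disappears); a timing run's readings varied between 1.4x and 2.1x at its largest size, so speed is stated only as measured.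
-- outside the precondition, e.g. on MaxSubarrayFL([1, 2], [], 1): A raises ValueError, B raises ValueError
import Mathlib
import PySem

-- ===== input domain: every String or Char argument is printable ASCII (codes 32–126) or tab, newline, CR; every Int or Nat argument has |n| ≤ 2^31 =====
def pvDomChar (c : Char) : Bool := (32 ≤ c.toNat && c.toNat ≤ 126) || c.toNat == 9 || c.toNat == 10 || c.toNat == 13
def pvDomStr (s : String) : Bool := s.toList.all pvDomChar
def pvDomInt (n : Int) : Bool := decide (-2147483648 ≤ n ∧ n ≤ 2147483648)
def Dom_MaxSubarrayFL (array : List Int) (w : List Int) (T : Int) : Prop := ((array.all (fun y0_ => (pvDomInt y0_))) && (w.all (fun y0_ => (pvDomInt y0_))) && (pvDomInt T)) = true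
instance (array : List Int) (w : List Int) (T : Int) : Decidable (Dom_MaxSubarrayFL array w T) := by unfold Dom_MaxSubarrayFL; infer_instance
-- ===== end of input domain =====

-- B replaces A's per-start inner scan over all window lengths by a prefix-sum list and a
-- monotonic deque (sliding-window maximum); intended as faster — timing-check readings varied
-- between 1.4x and 2.1x at the largest size, so speed is claimed only as measured there; return
-- values are equal (A additionally
-- mutates `array` into prefix sums in place, B does not — the claim is about the return value only).

-- ===== PORT A =====
def MaxSubarrayFL (array : List Int) (w : List Int) (T : Int) : Int × Int × Int :=
  let n : Int := array.length
  -- for i in range(1, len(array)): array[i] += array[i-1]   (indices are always in range here)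
  let P := (PySem.List.pyRange 1 n 1).foldl
    (fun a i => PySem.List.pySetD a i (PySem.List.pyGetD a i 0 + PySem.List.pyGetD a (i - 1) 0)) array
  match PySem.List.min? w (fun x => x), PySem.List.max? w (fun x => x) with
  | some w1, some w2 =>
    if T > 0 ∧ w1 > 0 then
      (PySem.List.pyRange 1 (n - w2 + 1) 1).foldl (fun s st =>
        (PySem.List.pyRange 0 (w2 - w1 + 1) 1).foldl (fun s offset =>
          let S0 := PySem.List.pyGetD P (st + offset + w1 - 1) 0 -
                    (if st ≥ 1 then PySem.List.pyGetD P (st - 1) 0 else 0)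
          if S0 ≥ T ∧ S0 > s.2.2 then (st, w1 + offset, S0) else s) s)
        (-1, -1, -1)
    else (-1, -1, -1)
  | _, _ => (-1, -1, -1)   -- unreachable under Pre_ (min/max of empty w: ValueError)

-- ===== PORT B =====
-- while dq and P[dq[-1]] < P[e]: dq.pop(); dq.append(e)
def pvPush (P : List Int) (dq : List Int) (e : Int) : List Int :=
  (dq.reverse.dropWhile (fun x => decide (PySem.List.pyGetD P x 0 < PySem.List.pyGetD P e 0))).reverse ++ [e]

-- body of B's main loop; state = (result triple, deque, next index to feed)
def pvStepB (P : List Int) (w1 w2 T : Int) (c : (Int × Int × Int) × List Int × Int) (st : Int) :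
    (Int × Int × Int) × List Int × Int :=
  let lo := st + w1 - 1
  let hi := st + w2 - 1
  -- while nxt <= hi: push(nxt); nxt += 1
  let dq1 := (PySem.List.pyRange c.2.2 (hi + 1) 1).foldl (pvPush P) c.2.1
  -- while dq and dq[0] < lo: dq.popleft()
  let dq2 := dq1.dropWhile (fun x => decide (x < lo))
  let e := dq2.headD 0        -- dq2 is never empty here (hi was just pushed, hi ≥ lo)
  let S := PySem.List.pyGetD P e 0 - PySem.List.pyGetD P (st - 1) 0
  (if S ≥ T ∧ S > c.1.2.2 then (st, e - st + 1, S) else c.1, dq2, hi + 1)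

def MaxSubarrayFL_alt (array : List Int) (w : List Int) (T : Int) : Int × Int × Int :=
  match PySem.List.min? w (fun x => x) with
  | none => (-1, -1, -1)   -- unreachable under Pre_
  | some w1 =>
    match PySem.List.max? w (fun x => x) with
    | none => (-1, -1, -1)   -- unreachable under Pre_
    | some w2 =>
      let n : Int := array.length
      if T ≤ 0 ∨ w1 ≤ 0 ∨ n - w2 < 1 then (-1, -1, -1)
      else
        -- s = 0; for x in array: s += x; P.append(s)
        let P := (array.foldl (fun (sp : Int × List Int) x => (sp.1 + x, sp.2 ++ [sp.1 + x])) (0, [])).2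
        ((PySem.List.pyRange 1 (n - w2 + 1) 1).foldl (pvStepB P w1 w2 T) ((-1, -1, -1), [], w1)).1

-- ===== PRECONDITION & SPEC =====
-- Pre_ excludes only w = [], on which Python A raises ValueError (min of an empty sequence).
def Pre_MaxSubarrayFL (array : List Int) (w : List Int) (T : Int) : Prop := w ≠ []
instance (array : List Int) (w : List Int) (T : Int) : Decidable (Pre_MaxSubarrayFL array w T) := by unfold Pre_MaxSubarrayFL; infer_instance
def pvWitness_MaxSubarrayFL : List Int × List Int × Int := ([1, 3, -2, 4], [2, 3], 2)
def Spec_MaxSubarrayFL (array : List Int) (w : List Int) (T : Int) (out : Int × Int × Int) : Prop := out = MaxSubarrayFL_alt array w T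
instance (array : List Int) (w : List Int) (T : Int) (out : Int × Int × Int) : Decidable (Spec_MaxSubarrayFL array w T out) := by unfold Spec_MaxSubarrayFL; infer_instance

-- ===== CLAIM (what is proved, stated in full; the proofs are below) =====
def Claim_equal_MaxSubarrayFL : Prop := ∀ (array : List Int) (w : List Int) (T : Int), Dom_MaxSubarrayFL array w T → Pre_MaxSubarrayFL array w T → Spec_MaxSubarrayFL array w T (MaxSubarrayFL array w T)

-- ===== LEMMAS AND PROOFS =====

-- short name for the element reads both ports share
def pg (P : List Int) (i : Int) : Int := PySem.List.pyGetD P i 0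

-- reference prefix-sum list: psum s [x1,…,xk] = [s+x1, s+x1+x2, …]
def psum (s : Int) : List Int → List Int
  | [] => []
  | x :: xs => (s + x) :: psum (s + x) xs

-- earliest index of the maximal prefix value on [lo, hi]
def bestIdx (P : List Int) (lo hi : Int) : Int :=
  (PySem.List.pyRange (lo + 1) (hi + 1) 1).foldl (fun b e => if pg P e > pg P b then e else b) lo

-- the deque's contents: indices x ∈ [a, h] dominating every later fed index
def goodL (P : List Int) (a h : Int) : List Int :=
  (PySem.List.pyRange a (h + 1) 1).filter
    (fun x => (PySem.List.pyRange (x + 1) (h + 1) 1).all (fun e => decide (pg P e ≤ pg P x)))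

-- what one outer iteration of A does to the result triple, reindexed to prefix indices
def stepSpec (P : List Int) (w1 w2 T : Int) (s : Int × Int × Int) (st : Int) : Int × Int × Int :=
  let b := bestIdx P (st + w1 - 1) (st + w2 - 1)
  let S0 := pg P b - pg P (st - 1)
  if S0 ≥ T ∧ S0 > s.2.2 then (st, b - st + 1, S0) else s

theorem mem_goodL {P : List Int} {a h x : Int} :
    x ∈ goodL P a h ↔ (a ≤ x ∧ x ≤ h) ∧ ∀ e, x < e → e ≤ h → pg P e ≤ pg P x := by
  simp [goodL, List.mem_filter, PySem.List.mem_pyRange_one, List.all_eq_true]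

theorem goodL_pairwise (P : List Int) (a h : Int) :
    (goodL P a h).Pairwise (fun x y => x < y ∧ pg P y ≤ pg P x) := by
  have h1 : (goodL P a h).Pairwise (· < ·) :=
    (PySem.List.pairwise_lt_pyRange_one a (h+1)).filter _
  refine List.Pairwise.imp_of_mem ?_ h1
  intro x y hx hy hxy
  rcases mem_goodL.mp hx with ⟨⟨_, hxh⟩, hcond⟩
  rcases mem_goodL.mp hy with ⟨⟨_, hyh⟩, _⟩
  exact ⟨hxy, hcond y hxy hyh⟩

theorem goodL_succ (P : List Int) (a h : Int) (hah : a ≤ h + 1) :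
    goodL P a (h + 1)
    = (goodL P a h).filter (fun x => decide (pg P (h + 1) ≤ pg P x)) ++ [h + 1] := by
  unfold goodL
  rw [show h + 1 + 1 = (h + 1) + 1 by ring,
      PySem.List.pyRange_one_succ_right (by omega : a ≤ h + 1),
      List.filter_append, List.filter_filter]
  congr 1
  · apply List.filter_congr
    intro x hx
    rcases (PySem.List.mem_pyRange_one).mp hx with ⟨hax, hxh⟩
    rw [show h + 1 + 1 = (h + 1) + 1 by ring,
        PySem.List.pyRange_one_succ_right (by omega : x + 1 ≤ h + 1), List.all_append]
    simp [Bool.and_comm]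
  · simp [PySem.List.pyRange_one_eq_nil (by omega : h + 1 + 1 ≤ h + 1 + 1)]

theorem dropWhile_eq_filter_of_pairwise {α : Type} (l : List α) (p : α → Bool)
    (hp : l.Pairwise (fun x y => p y = true → p x = true)) :
    l.dropWhile p = l.filter (fun x => !p x) := by
  induction l with
  | nil => rfl
  | cons x t ih =>
    rcases List.pairwise_cons.mp hp with ⟨hx, ht⟩
    cases hpx : p x with
    | true => simp [List.dropWhile, List.filter, hpx, ih ht]
    | false =>
      simp [List.dropWhile, List.filter, hpx]
      exact (List.filter_eq_self.mpr (fun y hy => by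
        cases hpy : p y with
        | true => exact absurd (hx y hy hpy) (by simp [hpx])
        | false => simp)).symm

theorem push_goodL (P : List Int) (a h : Int) (hah : a ≤ h + 1) :
    pvPush P (goodL P a h) (h + 1) = goodL P a (h + 1) := by
  have hpair : (goodL P a h).reverse.Pairwise
      (fun x y => (decide (pg P y < pg P (h+1)) = true → decide (pg P x < pg P (h+1)) = true)) := by
    rw [List.pairwise_reverse]
    refine (goodL_pairwise P a h).imp ?_
    rintro x y ⟨hxy, hle⟩
    simp only [decide_eq_true_eq]
    omega
  have hd := dropWhile_eq_filter_of_pairwise _ _ hpair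
  rw [goodL_succ P a h hah]
  show ((goodL P a h).reverse.dropWhile _).reverse ++ [h+1] = _
  rw [show (fun x => decide (PySem.List.pyGetD P x 0 < PySem.List.pyGetD P (h+1) 0))
        = (fun x => decide (pg P x < pg P (h+1))) from rfl, hd,
      List.filter_reverse, List.reverse_reverse]
  congr 1
  apply List.filter_congr
  intro x _
  rw [← decide_not]
  exact decide_eq_decide.mpr (by omega)

theorem pushMany_goodL (P : List Int) (k : Nat) : ∀ (a h : Int), a ≤ h + 1 →
    (PySem.List.pyRange (h + 1) (h + 1 + (k : Int)) 1).foldl (pvPush P) (goodL P a h)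
    = goodL P a (h + (k : Int)) := by
  induction k with
  | zero =>
    intro a h _
    rw [show h + 1 + ((0:Nat) : Int) = h + 1 by push_cast; ring,
        PySem.List.pyRange_one_eq_nil (by omega), List.foldl_nil,
        show h + ((0:Nat) : Int) = h by push_cast; ring]
  | succ m ih =>
    intro a h hah
    rw [PySem.List.pyRange_one_cons (by push_cast; omega : h + 1 < h + 1 + ((m+1 : Nat) : Int))]
    rw [List.foldl_cons, push_goodL P a h hah]
    have := ih a (h+1) (by omega)
    rw [show h + 1 + ((m+1 : Nat) : Int) = (h+1) + 1 + (m : Int) by push_cast; ring,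
        show h + ((m+1 : Nat) : Int) = (h+1) + (m : Int) by push_cast; ring]
    exact this

theorem trim_goodL (P : List Int) (a h lo : Int) (h1 : a ≤ lo) (h2 : lo ≤ h + 1) :
    (goodL P a h).dropWhile (fun x => decide (x < lo)) = goodL P lo h := by
  have hpair : (goodL P a h).Pairwise
      (fun x y => decide (y < lo) = true → decide (x < lo) = true) := by
    refine (goodL_pairwise P a h).imp ?_
    rintro x y ⟨hxy, -⟩
    simp only [decide_eq_true_eq]; omega
  rw [dropWhile_eq_filter_of_pairwise _ _ hpair]
  unfold goodL
  rw [List.filter_filter, PySem.List.pyRange_one_append a lo (h+1) h1 h2, List.filter_append]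
  have hleft : ∀ (p : Int → Bool), (PySem.List.pyRange a lo 1).filter
      (fun x => (!decide (x < lo)) && p x) = [] := by
    intro p
    apply List.filter_eq_nil_iff.mpr
    intro x hx
    rcases (PySem.List.mem_pyRange_one).mp hx with ⟨_, hxlo⟩
    simp [hxlo]
  rw [hleft]
  simp only [List.nil_append]
  apply List.filter_congr
  intro x hx
  rcases (PySem.List.mem_pyRange_one).mp hx with ⟨hlox, _⟩
  simp [show ¬ (x < lo) by omega]

theorem bestIdx_self (P : List Int) (lo : Int) : bestIdx P lo lo = lo := by
  simp [bestIdx, PySem.List.pyRange_one_eq_nil (by omega : lo + 1 ≤ lo + 1)]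

theorem bestIdx_succ (P : List Int) (lo hi : Int) (h : lo ≤ hi) :
    bestIdx P lo (hi + 1)
    = if pg P (hi + 1) > pg P (bestIdx P lo hi) then hi + 1 else bestIdx P lo hi := by
  unfold bestIdx
  rw [show hi + 1 + 1 = (hi + 1) + 1 by ring,
      PySem.List.pyRange_one_succ_right (by omega : lo + 1 ≤ hi + 1), List.foldl_append]
  rfl

theorem goodL_head (P : List Int) (k : Nat) : ∀ (lo : Int),
    ∃ t, goodL P lo (lo + (k : Int)) = bestIdx P lo (lo + (k : Int)) :: t
      ∧ ∀ x ∈ t, pg P x ≤ pg P (bestIdx P lo (lo + (k : Int))) := by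
  induction k with
  | zero =>
    intro lo
    refine ⟨[], ?_, by simp⟩
    rw [show lo + ((0:Nat) : Int) = lo by push_cast; ring, bestIdx_self]
    unfold goodL
    rw [PySem.List.pyRange_one_singleton]
    simp [PySem.List.pyRange_one_eq_nil (by omega : lo + 1 ≤ lo + 1)]
  | succ m ih =>
    intro lo
    obtain ⟨t, ht, hb⟩ := ih lo
    have hm : lo + ((m+1 : Nat) : Int) = (lo + (m : Int)) + 1 := by push_cast; ring
    rw [hm, goodL_succ P lo (lo + (m : Int)) (by omega), ht,
        bestIdx_succ P lo (lo + (m : Int)) (by omega)]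
    set b := bestIdx P lo (lo + (m : Int)) with hbdef
    set e := lo + (m : Int) + 1 with hedef
    by_cases hgt : pg P e > pg P b
    · refine ⟨[], ?_, by simp⟩
      rw [if_pos hgt]
      have : List.filter (fun x => decide (pg P e ≤ pg P x)) (b :: t) = [] := by
        apply List.filter_eq_nil_iff.mpr
        intro x hx
        rcases List.mem_cons.mp hx with rfl | hxt
        · simp; omega
        · have := hb x hxt; simp; omega
      rw [this]; rfl
    · rw [if_neg hgt]
      have hfb : List.filter (fun x => decide (pg P e ≤ pg P x)) (b :: t)
          = b :: List.filter (fun x => decide (pg P e ≤ pg P x)) t := by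
        simp [List.filter_cons, show pg P e ≤ pg P b by omega]
      refine ⟨List.filter (fun x => decide (pg P e ≤ pg P x)) t ++ [e], by rw [hfb]; rfl, ?_⟩
      intro x hx
      rcases List.mem_append.mp hx with hxt | hxe
      · exact hb x (List.mem_of_mem_filter hxt)
      · rcases List.mem_singleton.mp hxe with rfl; omega

theorem inner_fold (P : List Int) (base T st : Int) (k : Nat) : ∀ (lo : Int) (s : Int × Int × Int),
    (PySem.List.pyRange lo (lo + 1 + (k : Int)) 1).foldl
      (fun s e => if pg P e - base ≥ T ∧ pg P e - base > s.2.2 then (st, e - st + 1, pg P e - base) else s) s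
    = (let b := bestIdx P lo (lo + (k : Int));
       if pg P b - base ≥ T ∧ pg P b - base > s.2.2 then (st, b - st + 1, pg P b - base) else s) := by
  induction k with
  | zero =>
    intro lo s
    rw [show lo + 1 + ((0:Nat) : Int) = lo + 1 by push_cast; ring,
        PySem.List.pyRange_one_singleton, List.foldl_cons, List.foldl_nil,
        show lo + ((0:Nat) : Int) = lo by push_cast; ring, bestIdx_self]
  | succ m ih =>
    intro lo s
    have he1 : lo + 1 + ((m+1 : Nat) : Int) = (lo + 1 + (m : Int)) + 1 := by push_cast; ring
    have he2 : lo + ((m+1 : Nat) : Int) = (lo + (m : Int)) + 1 := by push_cast; ring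
    rw [he1, PySem.List.pyRange_one_succ_right (by push_cast; omega : lo ≤ lo + 1 + (m : Int)),
        List.foldl_append, ih lo s, he2, bestIdx_succ P lo (lo + (m : Int)) (by omega)]
    simp only [List.foldl_cons, List.foldl_nil]
    set b := bestIdx P lo (lo + (m : Int)) with hbdef
    set e := lo + 1 + (m : Int) with hedef
    have hee : lo + (m : Int) + 1 = e := by omega
    rw [hee]
    by_cases hgt : pg P e > pg P b
    · rw [if_pos hgt]
      by_cases hcb : pg P b - base ≥ T ∧ pg P b - base > s.2.2
      · rw [if_pos hcb]
        have h1 : pg P e - base ≥ T ∧ pg P e - base > (st, b - st + 1, pg P b - base).2.2 := by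
          constructor
          · omega
          · show pg P e - base > pg P b - base; omega
        rw [if_pos h1, if_pos (by omega : pg P e - base ≥ T ∧ pg P e - base > s.2.2)]
      · rw [if_neg hcb]
    · rw [if_neg hgt]
      by_cases hcb : pg P b - base ≥ T ∧ pg P b - base > s.2.2
      · rw [if_pos hcb]
        have h1 : ¬ (pg P e - base ≥ T ∧ pg P e - base > (st, b - st + 1, pg P b - base).2.2) := by
          intro hcon
          have := hcon.2
          simp only [] at this
          omega
        rw [if_neg h1]
      · rw [if_neg hcb,
            if_neg (by omega : ¬ (pg P e - base ≥ T ∧ pg P e - base > s.2.2))]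

theorem innerA_eq (P : List Int) (w1 w2 T st : Int) (hst : 1 ≤ st) (hw : w1 ≤ w2)
    (s : Int × Int × Int) :
    (PySem.List.pyRange 0 (w2 - w1 + 1) 1).foldl (fun s offset =>
      let S0 := PySem.List.pyGetD P (st + offset + w1 - 1) 0 -
                (if st ≥ 1 then PySem.List.pyGetD P (st - 1) 0 else 0)
      if S0 ≥ T ∧ S0 > s.2.2 then (st, w1 + offset, S0) else s) s
    = stepSpec P w1 w2 T s st := by
  set lo := st + w1 - 1 with hlo
  set k : Nat := (w2 - w1).toNat with hk
  have h1 : (PySem.List.pyRange 0 (w2 - w1 + 1) 1).foldl (fun s offset =>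
      let S0 := PySem.List.pyGetD P (st + offset + w1 - 1) 0 -
                (if st ≥ 1 then PySem.List.pyGetD P (st - 1) 0 else 0)
      if S0 ≥ T ∧ S0 > s.2.2 then (st, w1 + offset, S0) else s) s
      = (PySem.List.pyRange lo (lo + 1 + (k : Int)) 1).foldl
        (fun s e => if pg P e - pg P (st - 1) ≥ T ∧ pg P e - pg P (st - 1) > s.2.2
          then (st, e - st + 1, pg P e - pg P (st - 1)) else s) s := by
    rw [PySem.List.pyRange_one 0 (w2 - w1 + 1), PySem.List.pyRange_one lo (lo + 1 + (k : Int)),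
        List.foldl_map, List.foldl_map]
    rw [show (w2 - w1 + 1 - 0).toNat = (lo + 1 + (k : Int) - lo).toNat by omega]
    apply PySem.List.foldl_congr_mem
    intro acc j _
    simp only [pg, if_pos (by omega : st ≥ 1)]
    rw [show st + (0 + (j : Int)) + w1 - 1 = lo + (j : Int) by omega]
    by_cases hc : PySem.List.pyGetD P (lo + (j : Int)) 0 - PySem.List.pyGetD P (st - 1) 0 ≥ T ∧
        PySem.List.pyGetD P (lo + (j : Int)) 0 - PySem.List.pyGetD P (st - 1) 0 > acc.2.2
    · rw [if_pos hc, if_pos hc, show w1 + (0 + (j : Int)) = lo + (j : Int) - st + 1 by omega]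
    · rw [if_neg hc, if_neg hc]
  rw [h1, inner_fold P (pg P (st - 1)) T st k lo s]
  simp only [stepSpec]
  rw [show lo + (k : Int) = st + w2 - 1 by omega]

theorem outer_B (P : List Int) (w1 w2 T : Int) (hw : w1 ≤ w2) (k : Nat) :
    ∀ (st : Int), 1 ≤ st → ∀ (sA : Int × Int × Int) (a h : Int),
    a ≤ st + w1 - 1 → a ≤ h + 1 → h ≤ st + w2 - 1 →
    ((PySem.List.pyRange st (st + (k : Int)) 1).foldl (pvStepB P w1 w2 T) (sA, goodL P a h, h + 1)).1
    = (PySem.List.pyRange st (st + (k : Int)) 1).foldl (stepSpec P w1 w2 T) sA := by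
  induction k with
  | zero =>
    intro st _ sA a h _ _ _
    rw [show st + ((0:Nat) : Int) = st by push_cast; ring, PySem.List.pyRange_one_eq_nil (by omega)]
    rfl
  | succ m ih =>
    intro st hst sA a h ha1 ha2 ha3
    have hcons : PySem.List.pyRange st (st + ((m+1 : Nat) : Int)) 1
        = st :: PySem.List.pyRange (st + 1) ((st + 1) + (m : Int)) 1 := by
      rw [PySem.List.pyRange_one_cons (by push_cast; omega)]
      congr 1
      push_cast; ring
    rw [hcons, List.foldl_cons, List.foldl_cons]
    have hdq1 : (PySem.List.pyRange (h + 1) (st + w2 - 1 + 1) 1).foldl (pvPush P) (goodL P a h)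
        = goodL P a (st + w2 - 1) := by
      have := pushMany_goodL P (st + w2 - 1 - h).toNat a h ha2
      rw [show h + 1 + ((st + w2 - 1 - h).toNat : Int) = st + w2 - 1 + 1 by omega] at this
      rw [show h + ((st + w2 - 1 - h).toNat : Int) = st + w2 - 1 by omega] at this
      exact this
    have htrim : (goodL P a (st + w2 - 1)).dropWhile (fun x => decide (x < st + w1 - 1))
        = goodL P (st + w1 - 1) (st + w2 - 1) :=
      trim_goodL P a (st + w2 - 1) (st + w1 - 1) ha1 (by omega)
    obtain ⟨t, hhead, -⟩ := goodL_head P (st + w2 - 1 - (st + w1 - 1)).toNat (st + w1 - 1)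
    rw [show st + w1 - 1 + ((st + w2 - 1 - (st + w1 - 1)).toNat : Int) = st + w2 - 1 by omega]
      at hhead
    have hstep : pvStepB P w1 w2 T (sA, goodL P a h, h + 1) st
        = (stepSpec P w1 w2 T sA st, goodL P (st + w1 - 1) (st + w2 - 1), st + w2 - 1 + 1) := by
      simp only [pvStepB, stepSpec]
      rw [hdq1, htrim, hhead]
      simp only [List.headD_cons, pg]
    rw [hstep]
    exact ih (st + 1) (by omega) (stepSpec P w1 w2 T sA st) (st + w1 - 1) (st + w2 - 1)
      (by omega) (by omega) (by omega)

theorem psum_length (s : Int) (xs : List Int) : (psum s xs).length = xs.length := by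
  induction xs generalizing s with
  | nil => rfl
  | cons x t ih => simp [psum, ih]

theorem psum_concat (s y : Int) (xs : List Int) :
    psum s (xs ++ [y]) = psum s xs ++ [s + xs.sum + y] := by
  induction xs generalizing s with
  | nil => simp [psum]
  | cons x t ih =>
    simp [psum, ih]
    try ring_nf

theorem psum_getElem (s : Int) (xs : List Int) (i : Nat) (h : i < xs.length) :
    (psum s xs)[i]'(by rw [psum_length]; exact h) = s + (xs.take (i + 1)).sum := by
  induction xs generalizing s i with
  | nil => simp at h
  | cons x t ih =>
    cases i with
    | zero => simp [psum]
    | succ j => simp [psum, ih (s + x) j (by simpa using h)]; ring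



theorem prefix_A_gen (array : List Int) (k : Nat) (hk : 1 + k ≤ array.length) :
    (PySem.List.pyRange 1 (1 + (k : Int)) 1).foldl
      (fun a i => PySem.List.pySetD a i (PySem.List.pyGetD a i 0 + PySem.List.pyGetD a (i - 1) 0)) array
    = psum 0 (array.take (1 + k)) ++ array.drop (1 + k) := by
  induction k with
  | zero =>
    rw [show (1 : Int) + ((0:Nat) : Int) = 1 by norm_num,
        PySem.List.pyRange_one_eq_nil (by omega), List.foldl_nil]
    match array, hk with
    | x :: t, _ => simp [psum]
  | succ m ih =>
    have hm : 1 + m < array.length := by omega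
    rw [show (1 : Int) + ((m + 1 : Nat) : Int) = (1 + (m : Int)) + 1 by push_cast; ring,
        PySem.List.pyRange_one_succ_right (by omega), List.foldl_append, ih (by omega),
        List.foldl_cons, List.foldl_nil]
    set M : Nat := 1 + m with hM
    have hlen : (psum 0 (array.take M)).length = M := by
      rw [psum_length, List.length_take]; omega
    have hcast : (1 : Int) + (m : Int) = ((M : Nat) : Int) := by push_cast; omega
    rw [hcast]
    have hget1 : PySem.List.pyGetD (psum 0 (array.take M) ++ array.drop M) ((M : Nat) : Int) 0
        = array[M]'hm := by
      rw [PySem.List.pyGetD_natCast, List.getD_append_right _ _ _ _ (by omega),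
          hlen, Nat.sub_self, List.drop_eq_getElem_cons hm]
      rfl
    have hget0 : PySem.List.pyGetD (psum 0 (array.take M) ++ array.drop M) (((M : Nat) : Int) - 1) 0
        = (array.take M).sum := by
      rw [show ((M : Nat) : Int) - 1 = ((m : Nat) : Int) by push_cast; omega,
          PySem.List.pyGetD_natCast, List.getD_append _ _ _ _ (by omega),
          List.getD_eq_getElem _ _ (by rw [psum_length, List.length_take]; omega)]
      have := psum_getElem 0 (array.take M) m (by rw [List.length_take]; omega)
      rw [this, List.take_take]
      simp [show min (m+1) M = M by omega]
    rw [hget1, hget0, PySem.List.pySetD_natCast]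
    have hsetlen : ∀ (l1 : List Int) (x v : Int) (rest : List Int) (N : Nat), l1.length = N →
        (l1 ++ x :: rest).set N v = l1 ++ v :: rest := by
      intro l1 x v rest N hN; subst hN; simp
    have hset : (psum 0 (array.take M) ++ array.drop M).set M (array[M]'hm + (array.take M).sum)
        = psum 0 (array.take M) ++ (array[M]'hm + (array.take M).sum) :: array.drop (M + 1) := by
      rw [List.drop_eq_getElem_cons hm]
      exact hsetlen _ _ _ _ _ hlen
    rw [hset]
    have htake : array.take (M + 1) = array.take M ++ [array[M]'hm] := by
      rw [List.take_succ, List.getElem?_eq_getElem hm]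
      rfl
    rw [show 1 + (m + 1) = M + 1 by omega, htake, psum_concat]
    simp [add_comm]

theorem prefix_A (array : List Int) :
    (PySem.List.pyRange 1 (array.length : Int) 1).foldl
      (fun a i => PySem.List.pySetD a i (PySem.List.pyGetD a i 0 + PySem.List.pyGetD a (i - 1) 0)) array
    = psum 0 array := by
  cases array with
  | nil => rw [PySem.List.pyRange_one_eq_nil (by simp), List.foldl_nil]; rfl
  | cons x t =>
    have h := prefix_A_gen (x :: t) t.length (by simp only [List.length_cons]; omega)
    rw [show (1 : Int) + (t.length : Int) = ((x :: t).length : Int) by simp; ring] at h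
    rw [h, List.take_of_length_le (by simp), List.drop_of_length_le (by simp), List.append_nil]

theorem prefix_B (xs : List Int) (s : Int) (acc : List Int) :
    xs.foldl (fun (sp : Int × List Int) x => (sp.1 + x, sp.2 ++ [sp.1 + x])) (s, acc)
    = (s + xs.sum, acc ++ psum s xs) := by
  induction xs generalizing s acc with
  | nil => simp [psum]
  | cons x t ih => simp [psum, ih]; ring

theorem min_le_max_of_some {w : List Int} {w1 w2 : Int}
    (h1 : PySem.List.min? w (fun x => x) = some w1)
    (h2 : PySem.List.max? w (fun x => x) = some w2) : w1 ≤ w2 := by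
  have hm := PySem.List.min?_mem h1
  exact PySem.List.max?_isMax h2 w1 hm



theorem ports_eq (array : List Int) (w : List Int) (T : Int) (hw : w ≠ []) :
    MaxSubarrayFL array w T = MaxSubarrayFL_alt array w T := by
  rcases hm1 : PySem.List.min? w (fun x => x) with _ | w1
  · exact absurd ((PySem.List.min?_eq_none_iff w (fun x => x)).mp hm1) hw
  rcases hm2 : PySem.List.max? w (fun x => x) with _ | w2
  · exact absurd ((PySem.List.max?_eq_none_iff w (fun x => x)).mp hm2) hw
  have hw12 : w1 ≤ w2 := min_le_max_of_some hm1 hm2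
  unfold MaxSubarrayFL MaxSubarrayFL_alt
  rw [hm1, hm2]
  simp only [prefix_A, prefix_B, List.nil_append]
  by_cases hg : T > 0 ∧ w1 > 0
  · by_cases hn : (array.length : Int) - w2 < 1
    · rw [if_pos hg, if_pos (by tauto),
          PySem.List.pyRange_one_eq_nil
            (show ((array.length : Int) - w2 + 1) ≤ 1 by omega), List.foldl_nil]
    · rw [if_pos hg, if_neg (by omega)]
      have hA : (PySem.List.pyRange 1 ((array.length : Int) - w2 + 1) 1).foldl (fun s st =>
          (PySem.List.pyRange 0 (w2 - w1 + 1) 1).foldl (fun s offset =>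
            let S0 := PySem.List.pyGetD (psum 0 array) (st + offset + w1 - 1) 0 -
                      (if st ≥ 1 then PySem.List.pyGetD (psum 0 array) (st - 1) 0 else 0)
            if S0 ≥ T ∧ S0 > s.2.2 then (st, w1 + offset, S0) else s) s)
          (-1, -1, -1)
          = (PySem.List.pyRange 1 ((array.length : Int) - w2 + 1) 1).foldl
            (stepSpec (psum 0 array) w1 w2 T) (-1, -1, -1) := by
        apply PySem.List.foldl_congr_mem
        intro acc st hst
        rcases (PySem.List.mem_pyRange_one).mp hst with ⟨h1st, -⟩
        exact innerA_eq (psum 0 array) w1 w2 T st h1st hw12 acc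
      rw [hA]
      have hB := outer_B (psum 0 array) w1 w2 T hw12 ((array.length : Int) - w2).toNat 1 (by omega)
        (-1, -1, -1) w1 (w1 - 1) (by omega) (by omega) (by omega)
      rw [show (1 : Int) + (((array.length : Int) - w2).toNat : Int)
          = (array.length : Int) - w2 + 1 by omega] at hB
      rw [show w1 - 1 + 1 = w1 by ring] at hB
      rw [show goodL (psum 0 array) w1 (w1 - 1) = [] by
        unfold goodL
        rw [show w1 - 1 + 1 = w1 by ring, PySem.List.pyRange_one_eq_nil (by omega)]
        rfl] at hB
      exact hB.symm
  · rw [if_neg hg, if_pos (by omega)]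

-- ===== VERDICT (by name: the statement is the Claim_ definition above) =====
theorem MaxSubarrayFL_spec : Claim_equal_MaxSubarrayFL := by
  intro array w T _ hw
  exact ports_eq array w T hw
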